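-- pv_equiv track=rewrite | github.com/SocialFinanceDigitalLabs/AdventOfCode | solutions/2020/pughmds/day18/day18.py | parseBrackets
-- ===== SOURCE A (Python) =====
-- def parseBrackets(problemString):
--     bracketMap = []
--     index = 0
--     maxIndex = 0
--     for char in problemString:
--         if char == "(":
--             index += 1
--             if index > maxIndex:
--                 maxIndex += 1
--         if char == ")":
--             index -= 1
--         bracketMap.append(index)
--     if maxIndex < 0:
--         maxIndex = 0
--     return bracketMap, maxIndex
-- ===== SOURCE B (Python) =====
-- def parseBrackets(problemString):
--     # Divide and conquer: depth map of s = depth map of left half ++ (depth map of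
--     # right half shifted by the left half's net bracket balance); then clamped max.
--     def go(s):
--         if len(s) <= 1:
--             if not s:
--                 return [], 0
--             d = (s == "(") - (s == ")")
--             return [d], d
--         mid = len(s) // 2
--         lm, ln = go(s[:mid])
--         rm, rn = go(s[mid:])
--         return lm + [x + ln for x in rm], ln + rn
--     bracketMap, _ = go(problemString)
--     return bracketMap, max(0, max(bracketMap, default=0))
-- ===== Notes on version B (the rewrite author's own statement) =====
-- stated objective: alternative
-- what changed: B computes the depth map by divide-and-conquer (split the string in half, shift the right half's map by the left half's net balance, concatenate) instead of A's single left-to-right scan with inline max-tracking; the clamped max is taken over the finished map.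
import Mathlib
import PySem

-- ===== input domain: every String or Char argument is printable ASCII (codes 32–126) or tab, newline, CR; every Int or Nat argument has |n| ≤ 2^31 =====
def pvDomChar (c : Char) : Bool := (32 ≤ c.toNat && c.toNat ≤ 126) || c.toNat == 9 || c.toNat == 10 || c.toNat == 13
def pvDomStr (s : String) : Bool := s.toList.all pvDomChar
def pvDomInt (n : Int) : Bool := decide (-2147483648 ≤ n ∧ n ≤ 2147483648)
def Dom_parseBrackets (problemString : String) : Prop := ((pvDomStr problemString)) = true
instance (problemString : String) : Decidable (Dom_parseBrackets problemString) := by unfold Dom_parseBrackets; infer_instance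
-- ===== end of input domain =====

-- B builds the depth map by divide-and-conquer (right half shifted by the left half's net
-- balance) instead of A's single scan with inline max-tracking (alternative; same value).

-- ===== PORT A =====
-- A's loop: state (bracketMap, index, maxIndex), branches in source order.
def pbLoopA (cs : List Char) (bracketMap : List Int) (index maxIndex : Int) :
    List Int × Int :=
  match cs with
  | [] => (bracketMap, if maxIndex < 0 then 0 else maxIndex)
  | c :: rest =>
      let index1 := if c = '(' then index + 1 else index
      let maxIndex1 := if c = '(' then (if index1 > maxIndex then maxIndex + 1 else maxIndex) else maxIndex
      let index2 := if c = ')' then index1 - 1 else index1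
      pbLoopA rest (bracketMap ++ [index2]) index2 maxIndex1

def parseBrackets (problemString : String) : List Int × Int :=
  pbLoopA problemString.toList [] 0 0

-- ===== PORT B =====
def pbDelta (c : Char) : Int := (if c = '(' then 1 else 0) - (if c = ')' then 1 else 0)

-- B's recursive helper go: returns (depth map, net balance).
def pbGo (cs : List Char) : List Int × Int :=
  if _h : cs.length ≤ 1 then
    match cs with
    | [] => ([], 0)
    | c :: _ => ([pbDelta c], pbDelta c)
  else
    let mid := cs.length / 2
    let l := pbGo (cs.take mid)
    let r := pbGo (cs.drop mid)
    (l.1 ++ r.1.map (· + l.2), l.2 + r.2)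
termination_by cs.length
decreasing_by
  · simp [List.length_take]; omega
  · simp [List.length_drop]; omega

-- Python max(l, default=0)
def pbMaxD (l : List Int) : Int :=
  match l with
  | [] => 0
  | h :: t => t.foldl max h

def parseBrackets_alt (problemString : String) : List Int × Int :=
  let bracketMap := (pbGo problemString.toList).1
  (bracketMap, max 0 (pbMaxD bracketMap))

-- ===== PRECONDITION & SPEC =====
def Spec_parseBrackets (problemString : String) (out : List Int × Int) : Prop := out = parseBrackets_alt problemString
instance (problemString : String) (out : List Int × Int) : Decidable (Spec_parseBrackets problemString out) := by unfold Spec_parseBrackets; infer_instance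

-- ===== CLAIM (what is proved, stated in full; the proofs are below) =====
def Claim_equal_parseBrackets : Prop := ∀ (problemString : String), Dom_parseBrackets problemString → Spec_parseBrackets problemString (parseBrackets problemString)

-- ===== LEMMAS AND PROOFS =====

-- Prefix sums of a delta list, starting total i (proof-only abstraction both ports meet).
def pbPrefix (total : Int) (ds : List Int) : List Int :=
  match ds with
  | [] => []
  | d :: rest => (total + d) :: pbPrefix (total + d) rest

theorem foldl_max_max (a b : Int) (t : List Int) :
    t.foldl max (max a b) = max a (t.foldl max b) := by
  induction t generalizing b with
  | nil => rfl
  | cons h t ih => simp [List.foldl, max_assoc, ih]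

-- A's loop invariant: if index ≤ maxIndex, the loop produces the prefix sums
-- appended to the accumulator and the running maximum of maxIndex and all prefix sums.
theorem pbLoopA_inv (cs : List Char) (acc : List Int) (i m : Int) (h : i ≤ m) (h0 : 0 ≤ m) :
    pbLoopA cs acc i m =
      (acc ++ pbPrefix i (cs.map pbDelta),
       (pbPrefix i (cs.map pbDelta)).foldl max m) := by
  induction cs generalizing acc i m with
  | nil =>
      simp [pbLoopA, pbPrefix]
      omega
  | cons c rest ih =>
      have hstep :
          pbLoopA (c :: rest) acc i m =
            pbLoopA rest (acc ++ [i + pbDelta c]) (i + pbDelta c) (max m (i + pbDelta c)) := by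
        simp only [pbLoopA, pbDelta]
        by_cases hp : c = '('
        · have : ¬ c = ')' := by subst hp; decide
          simp [hp]
          congr 1
          omega
        · by_cases hq : c = ')'
          · simp [hq]
            congr 1
            omega
          · simp [hp, hq]
            congr 1
            omega
      rw [hstep, ih _ _ _ (le_max_right _ _) (le_trans h0 (le_max_left _ _))]
      simp [pbPrefix, foldl_max_max]

theorem pbMaxD_clamp (i : Int) (ds : List Int) :
    (pbPrefix i ds).foldl max (0 : Int) = max 0 (pbMaxD (pbPrefix i ds)) := by
  cases ds with
  | nil => simp [pbPrefix, pbMaxD]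
  | cons d rest =>
      simp [pbPrefix, pbMaxD]
      rw [← foldl_max_max 0 (i + d) (pbPrefix (i + d) rest), max_comm (0 : Int) (i + d),
          foldl_max_max, max_comm]

theorem pbPrefix_shift (ds : List Int) (i : Int) :
    pbPrefix i ds = (pbPrefix 0 ds).map (· + i) := by
  induction ds generalizing i with
  | nil => rfl
  | cons d rest ih =>
      simp [pbPrefix]
      constructor
      · omega
      · rw [ih (i + d), ih d, List.map_map]
        apply List.map_congr_left
        intro x _
        simp
        omega

theorem pbPrefix_append (a b : List Int) (i : Int) :
    pbPrefix i (a ++ b) = pbPrefix i a ++ pbPrefix (i + a.sum) b := by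
  induction a generalizing i with
  | nil => simp [pbPrefix]
  | cons d rest ih =>
      simp [pbPrefix, ih (i + d)]
      congr 1
      omega

-- B's recursion computes the prefix sums and the total of the deltas.
theorem pbGo_eq (n : Nat) (cs : List Char) (hn : cs.length ≤ n) :
    pbGo cs = (pbPrefix 0 (cs.map pbDelta), (cs.map pbDelta).sum) := by
  induction n generalizing cs with
  | zero =>
      have : cs = [] := List.length_eq_zero_iff.mp (Nat.le_zero.mp hn)
      subst this
      simp [pbGo, pbPrefix]
  | succ n ih =>
      rw [pbGo]
      split
      · next hle =>
          match cs, hle with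
          | [], _ => simp [pbPrefix]
          | [c], _ => simp [pbPrefix]
      · next hgt =>
          have h2 : 2 ≤ cs.length := by omega
          have hmid1 : 1 ≤ cs.length / 2 := by omega
          have hmid2 : cs.length / 2 < cs.length := by omega
          dsimp only
          rw [ih (cs.take (cs.length / 2)) (by simp; omega),
              ih (cs.drop (cs.length / 2)) (by simp; omega)]
          have hsplit : (cs.take (cs.length / 2)).map pbDelta ++ (cs.drop (cs.length / 2)).map pbDelta
              = cs.map pbDelta := by
            rw [← List.map_append, List.take_append_drop]
          dsimp only
          simp only [Prod.mk.injEq]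
          constructor
          · rw [← hsplit, pbPrefix_append, pbPrefix_shift _ (0 + _)]
            simp
          · rw [← hsplit]
            simp

-- ===== VERDICT (by name: the statement is the Claim_ definition above) =====
theorem parseBrackets_spec : Claim_equal_parseBrackets := by
  intro s _
  unfold Spec_parseBrackets parseBrackets parseBrackets_alt
  rw [pbLoopA_inv _ _ _ _ le_rfl le_rfl, pbGo_eq s.toList.length s.toList le_rfl]
  simp [pbMaxD_clamp]
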